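-- pv_equiv track=rewrite | github.com/dashabalashova/ImmLoom | scripts/normalize_fasta_names.py | sample_name_without_hap_and_ig
-- ===== SOURCE A (Python) =====
-- def sample_name_without_hap_and_ig(tokens, hap_index):
--     parts = []
--     for i, t in enumerate(tokens):
--         if i == hap_index:
--             continue
--         if i == len(tokens) - 1:
--             continue
--         parts.append(t)
--     return "_".join(parts)
-- ===== SOURCE B (Python) =====
-- def sample_name_without_hap_and_ig(tokens, hap_index):
--     body = tokens[:-1]
--     if 0 <= hap_index < len(body):
--         body = body[:hap_index] + body[hap_index + 1:]
--     return "_".join(body)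
-- ===== Notes on version B (the rewrite author's own statement) =====
-- stated objective: simpler
-- what changed: Replaces the per-element loop with two continue guards by bulk slicing: drop the last token with tokens[:-1], then remove the hap_index element by slice concatenation when it is in range.
import Mathlib
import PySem

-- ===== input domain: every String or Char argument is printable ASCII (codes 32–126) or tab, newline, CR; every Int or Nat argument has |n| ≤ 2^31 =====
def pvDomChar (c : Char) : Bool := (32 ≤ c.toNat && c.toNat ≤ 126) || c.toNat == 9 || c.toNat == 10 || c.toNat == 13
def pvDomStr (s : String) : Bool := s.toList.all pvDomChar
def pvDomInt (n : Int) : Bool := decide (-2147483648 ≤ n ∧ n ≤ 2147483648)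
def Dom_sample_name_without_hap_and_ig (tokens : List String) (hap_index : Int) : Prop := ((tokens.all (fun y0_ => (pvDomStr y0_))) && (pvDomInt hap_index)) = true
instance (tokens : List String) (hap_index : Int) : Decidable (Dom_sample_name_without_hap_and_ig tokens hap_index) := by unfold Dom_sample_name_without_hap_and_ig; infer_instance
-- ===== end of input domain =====

-- B replaces A's element-by-element loop (two continue guards) with bulk slicing: drop the last token, then cut out hap_index by slice concatenation; simpler, same cost.

-- ===== PORT A =====
def sample_name_without_hap_and_ig (tokens : List String) (hap_index : Int) : String :=
  let parts := (PySem.List.enumerate tokens).foldl (fun parts it =>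
    if it.1 = hap_index then parts
    else if it.1 = (tokens.length : Int) - 1 then parts
    else parts ++ [it.2]) []
  PySem.Str.join "_" parts

-- ===== PORT B =====
def sample_name_without_hap_and_ig_alt (tokens : List String) (hap_index : Int) : String :=
  let body := PySem.List.slice tokens none (some (-1))
  let body' := if 0 ≤ hap_index ∧ hap_index < (body.length : Int) then
      PySem.List.slice body none (some hap_index) ++ PySem.List.slice body (some (hap_index + 1)) none
    else body
  PySem.Str.join "_" body'

-- ===== PRECONDITION & SPEC =====
def Spec_sample_name_without_hap_and_ig (tokens : List String) (hap_index : Int) (out : String) : Prop := out = sample_name_without_hap_and_ig_alt tokens hap_index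
instance (tokens : List String) (hap_index : Int) (out : String) : Decidable (Spec_sample_name_without_hap_and_ig tokens hap_index out) := by unfold Spec_sample_name_without_hap_and_ig; infer_instance

-- ===== CLAIM (what is proved, stated in full; the proofs are below) =====
def Claim_equal_sample_name_without_hap_and_ig : Prop := ∀ (tokens : List String) (hap_index : Int), Dom_sample_name_without_hap_and_ig tokens hap_index → Spec_sample_name_without_hap_and_ig tokens hap_index (sample_name_without_hap_and_ig tokens hap_index)

-- ===== LEMMAS AND PROOFS =====

-- Keeping the entries of an enumeration whose index differs from hap = take/drop around hap (identity when hap is out of range).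
theorem pv_enum_filter_ne {α : Type} (ys : List α) (s hap : Int) :
    (((PySem.List.enumerate ys s).filter (fun p => decide (p.1 ≠ hap))).map (·.2))
    = if 0 ≤ hap - s ∧ hap - s < (ys.length : Int) then
        ys.take (hap - s).toNat ++ ys.drop ((hap - s).toNat + 1)
      else ys := by
  induction ys generalizing s with
  | nil => simp
  | cons y ys ih =>
    rw [PySem.List.enumerate_cons y ys s, List.filter_cons]
    by_cases hs : s = hap
    · simp only [hs, ne_eq, not_true_eq_false, decide_false, Bool.false_eq_true, if_false, ih]
      have hc : ¬ (0 ≤ hap - (hap + 1) ∧ hap - (hap + 1) < (ys.length : Int)) := by omega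
      have hc2 : 0 ≤ hap - hap ∧ hap - hap < ((y :: ys).length : Int) := by simp
      rw [if_neg hc, if_pos hc2]
      simp
    · simp only [ne_eq, hs, not_false_eq_true, decide_true, if_true, List.map_cons, ih]
      by_cases hr : 0 ≤ hap - (s + 1) ∧ hap - (s + 1) < (ys.length : Int)
      · have hr2 : 0 ≤ hap - s ∧ hap - s < ((y :: ys).length : Int) := by
          simp; omega
        rw [if_pos hr, if_pos hr2]
        have h1 : (hap - s).toNat = (hap - (s + 1)).toNat + 1 := by omega
        simp [h1]
      · have hr2 : ¬ (0 ≤ hap - s ∧ hap - s < ((y :: ys).length : Int)) := by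
          simp only [List.length_cons] at *; push_cast at *; omega
        rw [if_neg hr, if_neg hr2]

-- ===== VERDICT (by name: the statement is the Claim_ definition above) =====
theorem sample_name_without_hap_and_ig_spec : Claim_equal_sample_name_without_hap_and_ig := by
  intro tokens hap _
  unfold Spec_sample_name_without_hap_and_ig sample_name_without_hap_and_ig sample_name_without_hap_and_ig_alt
  have hbody : (fun (parts : List String) (it : Int × String) =>
      if it.1 = hap then parts
      else if it.1 = (tokens.length : Int) - 1 then parts
      else parts ++ [it.2])
    = (fun acc x => if (decide (x.1 ≠ hap) && decide (x.1 ≠ (tokens.length : Int) - 1)) = true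
        then acc ++ [x.2] else acc) := by
    funext acc x
    by_cases h1 : x.1 = hap <;> by_cases h2 : x.1 = (tokens.length : Int) - 1 <;> simp [h1, h2]
  rw [hbody, PySem.List.foldl_append_if]
  rcases tokens.eq_nil_or_concat with rfl | ⟨ys, y, rfl⟩
  · simp [PySem.List.enumerate_nil, PySem.List.slice]
  · simp only [List.concat_eq_append]
    rw [PySem.List.slice_to_neg_one, List.dropLast_concat]
    rw [PySem.List.enumerate_append, List.filter_append]
    have hlast : List.filter (fun x => decide (x.1 ≠ hap) && decide (x.1 ≠ ((ys ++ [y]).length : Int) - 1))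
        (PySem.List.enumerate [y] (0 + ys.length)) = [] := by
      simp [PySem.List.enumerate_cons, PySem.List.enumerate_nil]
    rw [hlast, List.append_nil]
    have hfil : List.filter (fun x => decide (x.1 ≠ hap) && decide (x.1 ≠ ((ys ++ [y]).length : Int) - 1))
        (PySem.List.enumerate ys 0)
        = List.filter (fun p => decide (p.1 ≠ hap)) (PySem.List.enumerate ys 0) := by
      apply List.filter_congr
      intro p hp
      rcases (PySem.List.mem_enumerate_iff ys 0 p).1 hp with ⟨k, hk, rfl⟩
      simp
      omega
    rw [hfil, pv_enum_filter_ne ys 0 hap]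
    simp only [List.nil_append, sub_zero]
    by_cases hr : 0 ≤ hap ∧ hap < (ys.length : Int)
    · rw [if_pos hr, if_pos hr]
      rw [PySem.List.slice_to ys hr.1, PySem.List.slice_from ys (by omega : (0:Int) ≤ hap + 1)]
      have : (hap + 1).toNat = hap.toNat + 1 := by omega
      rw [this]
    · rw [if_neg hr, if_neg hr]
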